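-- pv_equiv track=rewrite | github.com/borh/aozora-corpus-generator | unidic2udpos.py | partition_by_sentence
-- ===== SOURCE A (Python) =====
-- def sentence_break(s):
--     if s == '<EOS>' or s == '<PGB>':
--         return True
--     else:
--         return False
--
-- def partition_by_sentence(xs):
--     n = len(xs)
--     breaks = [i for i, x in enumerate(xs) if sentence_break(x)]
--     for i in range(len(breaks)-1, 0, -1):
--         if i > 0 and breaks[i] - breaks[i-1] == 1:
--             del breaks[i]
--     # breaks = [j for i, j in zip_longest(breaks, breaks[1:], fillvalue=0) if j - i != 1]
--     i = 0
--     for b in breaks: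
--         yield xs[i:b]
--         i = b
--     if i < n:
--         yield xs[i:n]
-- ===== SOURCE B (Python) =====
-- def sentence_break(s):
--     if s == '<EOS>' or s == '<PGB>':
--         return True
--     else:
--         return False
--
-- def partition_by_sentence(xs):
--     # One forward pass: a break starts a new segment unless it directly
--     # follows another break (runs of breaks are merged into their first).
--     n = len(xs)
--     start = 0
--     prev_is_break = False
--     for i, x in enumerate(xs):
--         b = sentence_break(x)
--         if b and not prev_is_break:
--             yield xs[start:i]
--             start = i
--         prev_is_break = b
--     if start < n:
--         yield xs[start:n]
-- ===== Notes on version B (the rewrite author's own statement) =====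
-- stated objective: alternative
-- what changed: Replaces A's three passes (collect break indices, backward del-loop merging adjacent breaks, slicing loop) with a single forward scan that tracks whether the previous token was a break and yields segment boundaries on the fly; intended as faster (A's del-loop is quadratic in the number of breaks) but a timing run could not confirm it consistently.
import Mathlib
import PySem

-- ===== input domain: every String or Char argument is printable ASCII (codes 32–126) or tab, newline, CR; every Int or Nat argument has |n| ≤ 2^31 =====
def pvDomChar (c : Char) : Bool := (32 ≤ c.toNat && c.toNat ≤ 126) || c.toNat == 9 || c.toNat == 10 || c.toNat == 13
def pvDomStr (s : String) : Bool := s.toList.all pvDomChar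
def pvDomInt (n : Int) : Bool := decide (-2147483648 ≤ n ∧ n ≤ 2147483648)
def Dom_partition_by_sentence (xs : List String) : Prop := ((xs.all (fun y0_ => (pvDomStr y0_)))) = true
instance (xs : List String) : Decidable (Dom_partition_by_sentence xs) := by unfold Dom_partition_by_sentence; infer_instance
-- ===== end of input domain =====

-- B replaces A's three passes (break-index list, backward deletion pass merging
-- adjacent breaks, slicing loop) by a single forward scan that emits segments directly.
-- Both generators are ported as the list of yielded segments.

-- ===== PORT A =====
def sentence_break (s : String) : Bool :=
  if s == "<EOS>" || s == "<PGB>" then true else false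

-- del bs[i]  (i ≥ 1 and i < bs.length whenever the loop reaches it)
def aDelStep (bs : List Int) (i : Int) : List Int :=
  if i > 0 ∧ PySem.List.pyGetD bs i 0 - PySem.List.pyGetD bs (i-1) 0 = 1 then
    bs.take i.toNat ++ bs.drop (i.toNat + 1)
  else bs

def aSegStep (xs : List String) (st : Int × List (List String)) (b : Int) :
    Int × List (List String) :=
  (b, st.2 ++ [PySem.List.slice xs (some st.1) (some b)])

def partition_by_sentence (xs : List String) : List (List String) :=
  let n : Int := xs.length
  let breaks : List Int :=
    (PySem.List.enumerate xs).foldl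
      (fun acc p => if sentence_break p.2 then acc ++ [p.1] else acc) []
  let breaks :=
    (PySem.List.pyRange ((breaks.length : Int) - 1) 0 (-1)).foldl aDelStep breaks
  let st := breaks.foldl (aSegStep xs) (0, [])
  if st.1 < n then st.2 ++ [PySem.List.slice xs (some st.1) (some n)] else st.2

-- ===== PORT B =====
-- state = (start, prev_is_break, yielded segments)
def bStep (xs : List String) (st : Int × Bool × List (List String)) (p : Int × String) :
    Int × Bool × List (List String) :=
  let b := sentence_break p.2
  if b && !st.2.1 then
    (p.1, b, st.2.2 ++ [PySem.List.slice xs (some st.1) (some p.1)])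
  else (st.1, b, st.2.2)

def partition_by_sentence_alt (xs : List String) : List (List String) :=
  let n : Int := xs.length
  let st := (PySem.List.enumerate xs).foldl (bStep xs) (0, false, [])
  if st.1 < n then st.2.2 ++ [PySem.List.slice xs (some st.1) (some n)] else st.2.2

-- ===== PRECONDITION & SPEC =====
def Spec_partition_by_sentence (xs : List String) (out : List (List String)) : Prop := out = partition_by_sentence_alt xs
instance (xs : List String) (out : List (List String)) : Decidable (Spec_partition_by_sentence xs out) := by unfold Spec_partition_by_sentence; infer_instance

-- ===== CLAIM (what is proved, stated in full; the proofs are below) =====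
def Claim_equal_partition_by_sentence : Prop := ∀ (xs : List String), Dom_partition_by_sentence xs → Spec_partition_by_sentence xs (partition_by_sentence xs)

-- ===== LEMMAS AND PROOFS =====

-- positions (from p) of break tokens
def posFrom (p : Int) : List String → List Int
  | [] => []
  | x :: t => if sentence_break x then p :: posFrom (p+1) t else posFrom (p+1) t

-- positions kept after merging a run of consecutive breaks into its first
def keptFrom (p : Int) (prev : Bool) : List String → List Int
  | [] => []
  | x :: t =>
    if sentence_break x && !prev then p :: keptFrom (p+1) (sentence_break x) t
    else keptFrom (p+1) (sentence_break x) t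

-- forward characterisation of A's backward deletion loop: keep an element unless it
-- exceeds its ORIGINAL predecessor by exactly 1
def gAux (prev : Option Int) : List Int → List Int
  | [] => []
  | b :: t =>
    (match prev with
     | none => [b]
     | some q => if b - q = 1 then [] else [b]) ++ gAux (some b) t

def pairSlices (xs : List String) (s : Int) : List Int → List (List String)
  | [] => []
  | b :: t => PySem.List.slice xs (some s) (some b) :: pairSlices xs b t

def lastD : List Int → Int → Int
  | [], d => d
  | b :: t, _ => lastD t b

def predOf (bs : List Int) (prev : Option Int) : Option Int :=
  match bs with
  | [] => prev
  | b :: t => some (lastD t b)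

lemma breaks_eq (t : List String) : ∀ (p : Int) (acc : List Int),
    (PySem.List.enumerate t p).foldl
      (fun acc q => if sentence_break q.2 then acc ++ [q.1] else acc) acc
    = acc ++ posFrom p t := by
  induction t with
  | nil => intro p acc; simp [PySem.List.enumerate_nil, posFrom]
  | cons x t ih =>
    intro p acc
    rw [PySem.List.enumerate_cons]
    by_cases hx : sentence_break x <;> simp [List.foldl_cons, hx, posFrom, ih]

lemma gAux_append : ∀ (bs : List Int) (prev : Option Int) (c : Int),
    gAux prev (bs ++ [c])
      = gAux prev bs ++ (match predOf bs prev with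
          | none => [c]
          | some q => if c - q = 1 then [] else [c]) := by
  intro bs
  induction bs with
  | nil => intro prev c; cases prev <;> simp [gAux, predOf]
  | cons a bs ih =>
    intro prev c
    have h := ih (some a) c
    cases bs with
    | nil => cases prev <;> simp_all [gAux, predOf, lastD]
    | cons b bs' => cases prev <;> simp_all [gAux, predOf, lastD]

lemma lastD_eq_getLast (t : List Int) : ∀ a : Int,
    lastD t a = (a :: t).getLast (List.cons_ne_nil a t) := by
  induction t with
  | nil => intro a; simp [lastD]
  | cons b t ih => intro a; rw [lastD, ih b, List.getLast_cons (List.cons_ne_nil b t)]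

lemma frame (k : Nat) : ∀ (ys : List Int) (c : Int), (k : Int) < ys.length →
    (PySem.List.pyRange k 0 (-1)).foldl aDelStep (ys ++ [c])
      = (PySem.List.pyRange k 0 (-1)).foldl aDelStep ys ++ [c] := by
  induction k with
  | zero =>
    intro ys c _
    simp only [Nat.cast_zero]
    rw [PySem.List.pyRange_neg_one_eq_nil le_rfl]
    simp
  | succ k ih =>
    intro ys c hk
    have hpos : (0:Int) < ((k:Int)+1) := by positivity
    have hlen : (k:Nat) + 1 < ys.length := by exact_mod_cast hk
    have hget1 : PySem.List.pyGetD (ys ++ [c]) ((k:Int)+1) 0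
        = PySem.List.pyGetD ys ((k:Int)+1) 0 := by
      rw [PySem.List.pyGetD_eq_getElem (ys ++ [c]) 0 (by omega)
            (by simp; omega),
          PySem.List.pyGetD_eq_getElem ys 0 (by omega) (by exact_mod_cast hk)]
      exact List.getElem_append_left (by omega)
    have hget2 : PySem.List.pyGetD (ys ++ [c]) ((k:Int)+1-1) 0
        = PySem.List.pyGetD ys ((k:Int)+1-1) 0 := by
      rw [PySem.List.pyGetD_eq_getElem (ys ++ [c]) 0 (by omega)
            (by simp; omega),
          PySem.List.pyGetD_eq_getElem ys 0 (by omega) (by omega)]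
      exact List.getElem_append_left (by omega)
    have hstep : aDelStep (ys ++ [c]) ((k:Int)+1) = aDelStep ys ((k:Int)+1) ++ [c] := by
      unfold aDelStep
      rw [hget1, hget2]
      split_ifs with hcond
      · have htn : ((k:Int)+1).toNat = k + 1 := by omega
        rw [htn, List.take_append_of_le_length (by omega),
            List.drop_append_of_le_length (by omega)]
        simp
      · rfl
    push_cast
    rw [PySem.List.pyRange_neg_one_cons hpos, List.foldl_cons, List.foldl_cons, hstep]
    have hk' : ((k:Nat) : Int) = (k:Int) + 1 - 1 := by omega
    -- case on whether the step deleted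
    unfold aDelStep
    split_ifs with hcond
    · have htn : ((k:Int)+1).toNat = k + 1 := by omega
      rw [htn]
      have hlen' : ((k:Nat) : Int) < ((ys.take (k+1) ++ ys.drop (k+1+1)).length : Int) := by
        simp
        omega
      rw [show (k:Int)+1-1 = ((k:Nat):Int) from by ring]
      exact ih (ys.take (k+1) ++ ys.drop (k+1+1)) c hlen'
    · rw [show (k:Int)+1-1 = ((k:Nat):Int) from by ring]
      exact ih ys c (by omega)

lemma loop_eq_gAux : ∀ bs : List Int,
    (PySem.List.pyRange ((bs.length : Int) - 1) 0 (-1)).foldl aDelStep bs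
      = gAux none bs := by
  intro bs
  induction bs using List.reverseRecOn with
  | nil => rw [PySem.List.pyRange_neg_one_eq_nil (by simp)]; rfl
  | append_singleton bs c ih =>
    cases bs with
    | nil =>
      rw [show ((([] ++ [c] : List Int)).length : Int) - 1 = 0 by simp,
          PySem.List.pyRange_neg_one_eq_nil le_rfl]
      rfl
    | cons a t =>
      set ys : List Int := a :: t with hys
      have hlen : (1:Int) ≤ ys.length := by simp [hys]
      have hlc : ((ys ++ [c]).length : Int) - 1 = (ys.length : Int) := by simp
      rw [hlc, PySem.List.pyRange_neg_one_cons (by omega), List.foldl_cons]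
      have hget1 : PySem.List.pyGetD (ys ++ [c]) (ys.length : Int) 0 = c := by
        rw [PySem.List.pyGetD_eq_getElem (ys ++ [c]) 0 (by omega) (by simp)]
        simp
      have hget2 : PySem.List.pyGetD (ys ++ [c]) ((ys.length : Int) - 1) 0
          = lastD t a := by
        have h2 : ys.length - 1 < ys.length := by simp [hys]
        rw [PySem.List.pyGetD_eq_getElem (ys ++ [c]) 0 (by omega) (by simp)]
        have htn : ((ys.length : Int) - 1).toNat = ys.length - 1 := by omega
        simp only [htn]
        rw [lastD_eq_getLast t a, List.getLast_eq_getElem]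
        exact List.getElem_append_left h2
      have hstep : aDelStep (ys ++ [c]) (ys.length : Int)
          = if c - lastD t a = 1 then ys else ys ++ [c] := by
        unfold aDelStep
        rw [hget1, hget2]
        have htn : ((ys.length : Int)).toNat = ys.length := by omega
        by_cases hcnd : c - lastD t a = 1
        · rw [if_pos ⟨by omega, hcnd⟩, if_pos hcnd, htn]
          simp
        · rw [if_neg (by tauto), if_neg hcnd]
      rw [hstep, gAux_append]
      have hpred : predOf ys none = some (lastD t a) := rfl
      rw [hpred]
      split_ifs with hc
      · simpa [hc] using ih
      · rw [show ((ys.length:Int) - 1) = ((ys.length - 1 : Nat) : Int) from by omega,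
            frame (ys.length - 1) ys c (by omega),
            show (((ys.length - 1 : Nat) : Nat) : Int) = (ys.length:Int) - 1 from by omega,
            ih]
        simp [hc]

lemma gAux_keptFrom (t : List String) : ∀ p : Int,
    (gAux none (posFrom p t) = keptFrom p false t)
    ∧ (gAux (some (p-1)) (posFrom p t) = keptFrom p true t)
    ∧ (∀ q : Int, q ≤ p - 2 → gAux (some q) (posFrom p t) = keptFrom p false t) := by
  induction t with
  | nil => intro p; refine ⟨rfl, rfl, fun q _ => rfl⟩
  | cons x t ih =>
    intro p
    by_cases hx : sentence_break x
    · have h2 := (ih (p+1)).2.1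
      have h2' : gAux (some p) (posFrom (p+1) t) = keptFrom (p+1) true t := by
        simpa using h2
      refine ⟨?_, ?_, ?_⟩
      · simp [posFrom, keptFrom, hx, gAux, h2']
      · simp [posFrom, keptFrom, hx, gAux, h2', show p - (p-1) = 1 by ring]
      · intro q hq
        have hne : ¬ (p - q = 1) := by omega
        simp [posFrom, keptFrom, hx, gAux, h2', hne]
    · have h1 := (ih (p+1)).1
      have h3 := (ih (p+1)).2.2
      refine ⟨?_, ?_, ?_⟩
      · simp [posFrom, keptFrom, hx, h1]
      · simp [posFrom, keptFrom, hx, h3 (p-1) (by omega)]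
      · intro q hq
        simp [posFrom, keptFrom, hx, h3 q (by omega)]

lemma segfold (xs : List String) : ∀ (ks : List Int) (s : Int) (out : List (List String)),
    ks.foldl (aSegStep xs) (s, out) = (lastD ks s, out ++ pairSlices xs s ks) := by
  intro ks
  induction ks with
  | nil => intro s out; simp [lastD, pairSlices]
  | cons b t ih =>
    intro s out
    rw [List.foldl_cons]
    show (t.foldl (aSegStep xs) (b, out ++ [PySem.List.slice xs (some s) (some b)]))
        = _
    rw [ih b]
    simp [lastD, pairSlices]

lemma bfold (xs : List String) (t : List String) :
    ∀ (p s : Int) (prev : Bool) (out : List (List String)),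
    ((PySem.List.enumerate t p).foldl (bStep xs) (s, prev, out)).1
        = lastD (keptFrom p prev t) s
    ∧ ((PySem.List.enumerate t p).foldl (bStep xs) (s, prev, out)).2.2
        = out ++ pairSlices xs s (keptFrom p prev t) := by
  induction t with
  | nil =>
    intro p s prev out
    simp [PySem.List.enumerate_nil, keptFrom, lastD, pairSlices]
  | cons x t ih =>
    intro p s prev out
    rw [PySem.List.enumerate_cons, List.foldl_cons]
    by_cases hc : sentence_break x && !prev
    · have hstep : bStep xs (s, prev, out) (p, x)
          = (p, sentence_break x, out ++ [PySem.List.slice xs (some s) (some p)]) := by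
        simp [bStep, hc]
      rw [hstep]
      have := ih (p+1) p (sentence_break x) (out ++ [PySem.List.slice xs (some s) (some p)])
      refine ⟨?_, ?_⟩
      · rw [this.1]; simp [keptFrom, hc, lastD]
      · rw [this.2]; simp [keptFrom, hc, pairSlices]
    · have hstep : bStep xs (s, prev, out) (p, x) = (s, sentence_break x, out) := by
        simp [bStep, hc]
      rw [hstep]
      have := ih (p+1) s (sentence_break x) out
      refine ⟨?_, ?_⟩
      · rw [this.1]; simp [keptFrom, hc]
      · rw [this.2]; simp [keptFrom, hc]

-- ===== VERDICT (by name: the statement is the Claim_ definition above) =====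
theorem partition_by_sentence_spec : Claim_equal_partition_by_sentence := by
  intro xs _
  show partition_by_sentence xs = partition_by_sentence_alt xs
  simp only [partition_by_sentence, partition_by_sentence_alt]
  rw [breaks_eq xs 0 [], List.nil_append, loop_eq_gAux, (gAux_keptFrom xs 0).1,
      segfold xs (keptFrom 0 false xs) 0 []]
  have hb := bfold xs xs 0 0 false []
  rw [hb.1, hb.2]
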